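-- pv_equiv track=rewrite | github.com/Anastasia02D/home_program_university | proga_5/f.py | f_ins
-- ===== SOURCE A (Python) =====
-- def add(arr, begin, i):
--     if begin != i-1:
--         k = i - begin
--         for j in range(k):
--             arr.insert(i, arr[begin])
--             i +=1
--             begin += 1;
--     return arr, begin, i
--
-- def f_ins(arr):
--     #print ("!", len(arr))
--     i = 1
--     begin = 0
--     while i < len(arr):
--         #print (i)
--         if arr[i - 1] >= arr[i]:
--             arr, begin, i = add(arr, begin, i)
--             begin = i
--         i += 1
--     arr, begin, i = add(arr, begin, i)
--     return arr
-- ===== SOURCE B (Python) =====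
-- def f_ins(arr):
--     # single pass: split into maximal strictly-increasing runs, emit run+run
--     # for runs of length >= 2, a lone element once (builds a new list; A
--     # mutates its argument in place, B does not - return values agree).
--     out = []
--     run = []
--     for x in arr:
--         if run and run[-1] < x:
--             run.append(x)
--         else:
--             out += run + run if len(run) > 1 else run
--             run = [x]
--     out += run + run if len(run) > 1 else run
--     return out
-- ===== Notes on version B (the rewrite author's own statement) =====
-- stated objective: faster
-- what changed: Replaced the in-place quadratic insert-by-insert duplication of each increasing run with a single left-to-right pass that accumulates the current run and extends a fresh output list with run+run, removing all list.insert shifting.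
import Mathlib
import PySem

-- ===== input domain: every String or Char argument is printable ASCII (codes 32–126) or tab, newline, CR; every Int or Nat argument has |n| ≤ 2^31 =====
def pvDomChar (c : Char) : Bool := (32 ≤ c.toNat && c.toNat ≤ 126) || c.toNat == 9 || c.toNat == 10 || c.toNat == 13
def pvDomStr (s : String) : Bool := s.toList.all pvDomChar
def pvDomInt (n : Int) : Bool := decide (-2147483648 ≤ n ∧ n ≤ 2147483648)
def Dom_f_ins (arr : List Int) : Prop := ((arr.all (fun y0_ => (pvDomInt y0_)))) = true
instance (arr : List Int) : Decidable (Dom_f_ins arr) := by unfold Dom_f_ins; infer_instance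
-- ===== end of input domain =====

-- B replaces A's quadratic in-place insert-by-insert run duplication with one O(n) pass
-- that extends a fresh output list with run+run; A mutates its argument in place, B does
-- not — the equivalence proved here is about the return value.

-- ===== PORT A =====
-- the 'for j in range(k)' loop inside add: arr.insert(i, arr[begin]); i += 1; begin += 1
def addLoopA : Nat → List Int → Int → Int → List Int × Int × Int
  | 0, arr, b, i => (arr, b, i)
  | j + 1, arr, b, i =>
      addLoopA j (PySem.List.insert arr i (PySem.List.pyGetD arr b 0)) (b + 1) (i + 1)

def addA (arr : List Int) (b i : Int) : List Int × Int × Int :=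
  if b ≠ i - 1 then addLoopA (i - b).toNat arr b i else (arr, b, i)

-- the while loop of f_ins; fuel only makes the recursion structural (arr.length suffices,
-- the fuel-0 branch returns the same final 'add' as the exit branch and is never the cut-off)
def loopA : Nat → List Int → Int → Int → List Int
  | 0, arr, b, i => (addA arr b i).1
  | fuel + 1, arr, b, i =>
      if i < (arr.length : Int) then
        if PySem.List.pyGetD arr (i - 1) 0 ≥ PySem.List.pyGetD arr i 0 then
          match addA arr b i with
          | (arr', _, i') => loopA fuel arr' i' (i' + 1)
        else loopA fuel arr b (i + 1)
      else (addA arr b i).1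

def f_ins (arr : List Int) : List Int := loopA arr.length arr 0 1

-- ===== PORT B =====
def dupStepB (st : List Int × List Int) (x : Int) : List Int × List Int :=
  if st.2 ≠ [] ∧ PySem.List.pyGetD st.2 (-1) 0 < x then (st.1, st.2 ++ [x])
  else (st.1 ++ (if 1 < st.2.length then st.2 ++ st.2 else st.2), [x])

def f_ins_alt (arr : List Int) : List Int :=
  let st := arr.foldl dupStepB ([], [])
  st.1 ++ (if 1 < st.2.length then st.2 ++ st.2 else st.2)

-- ===== PRECONDITION & SPEC =====
def Spec_f_ins (arr : List Int) (out : List Int) : Prop := out = f_ins_alt arr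
instance (arr : List Int) (out : List Int) : Decidable (Spec_f_ins arr out) := by unfold Spec_f_ins; infer_instance

-- ===== CLAIM (what is proved, stated in full; the proofs are below) =====
def Claim_equal_f_ins : Prop := ∀ (arr : List Int), Dom_f_ins arr → Spec_f_ins arr (f_ins arr)

-- ===== LEMMAS AND PROOFS =====

-- canonical value: emit the current run (last element l) duplicated when its length is > 1
def dupR (r : List Int) : List Int := if 1 < r.length then r ++ r else r

def runF : List Int → Int → List Int → List Int
  | run, _, [] => dupR run
  | run, l, x :: xs => if l < x then runF (run ++ [x]) x xs else dupR run ++ runF [x] x xs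

lemma getD_app (xs ys : List Int) (y : Int) : (xs ++ y :: ys).getD xs.length 0 = y := by
  simp [List.getD_eq_getElem?_getD]

lemma insert_split (L R : List Int) (v : Int) :
    PySem.List.insert (L ++ R) ((L.length : Nat) : Int) v = L ++ v :: R := by
  rw [PySem.List.insert_natCast _ _ _ (by simp)]
  simp


lemma addLoopA_inv (out rest : List Int) : ∀ (run' acc : List Int),
    addLoopA run'.length (out ++ acc ++ run' ++ acc ++ rest)
      ((out.length + acc.length : Nat) : Int)
      ((out.length + acc.length + run'.length + acc.length : Nat) : Int)
    = (out ++ acc ++ run' ++ acc ++ run' ++ rest,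
       ((out.length + acc.length + run'.length : Nat) : Int),
       ((out.length + acc.length + run'.length + acc.length + run'.length : Nat) : Int)) := by
  intro run'
  induction run' with
  | nil => intro acc; simp [addLoopA]
  | cons h t ih =>
    intro acc
    show addLoopA (t.length + 1) _ _ _ = _
    rw [addLoopA]
    have hget : PySem.List.pyGetD (out ++ acc ++ (h :: t) ++ acc ++ rest)
        ((out.length + acc.length : Nat) : Int) 0 = h := by
      rw [PySem.List.pyGetD_natCast]
      have : out ++ acc ++ (h :: t) ++ acc ++ rest
           = (out ++ acc) ++ h :: (t ++ acc ++ rest) := by simp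
      rw [this]
      have := getD_app (out ++ acc) (t ++ acc ++ rest) h
      simp only [List.length_append] at this
      exact this
    have hidx : ((out.length + acc.length + (h :: t).length + acc.length : Nat) : Int)
        = (((out ++ acc ++ (h :: t) ++ acc).length : Nat) : Int) := by
      simp; omega
    have hins : PySem.List.insert (out ++ acc ++ (h :: t) ++ acc ++ rest)
        ((out.length + acc.length + (h :: t).length + acc.length : Nat) : Int) h
        = out ++ acc ++ (h :: t) ++ acc ++ h :: rest := by
      rw [hidx, insert_split]
    rw [hget, hins]
    have H := ih (acc ++ [h])
    simp only [List.append_assoc, List.cons_append,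
      List.length_append, List.length_cons, List.length_nil] at H ⊢
    convert H using 2 <;> push_cast <;> ring_nf

lemma addA_spec (out run rest : List Int) (hr : run ≠ []) :
    addA (out ++ run ++ rest) ((out.length : Nat) : Int) ((out.length + run.length : Nat) : Int)
      = (out ++ dupR run ++ rest,
         (if 1 < run.length then ((out.length + run.length : Nat) : Int) else ((out.length : Nat) : Int)),
         ((out.length + (dupR run).length : Nat) : Int)) := by
  have hlen : 1 ≤ run.length := List.length_pos_of_ne_nil hr
  unfold addA
  by_cases hl : run.length = 1
  · have hc : ¬ ((out.length : Int) ≠ ((out.length + run.length : Nat) : Int) - 1) := by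
      push_cast; omega
    rw [if_neg hc]
    have hd : dupR run = run := by unfold dupR; rw [if_neg (by omega)]
    rw [hd, if_neg (by omega)]
  · have hc : ((out.length : Int) ≠ ((out.length + run.length : Nat) : Int) - 1) := by
      push_cast; omega
    rw [if_pos hc]
    have hk : (((out.length + run.length : Nat) : Int) - (out.length : Int)).toNat = run.length := by
      push_cast; omega
    rw [hk]
    have H := addLoopA_inv out rest run []
    simp only [List.append_nil, List.length_nil, Nat.add_zero] at H
    have hd : dupR run = run ++ run := by unfold dupR; rw [if_pos (by omega)]
    rw [hd, H, if_pos (by omega)]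
    refine Prod.ext (by simp) (Prod.ext rfl ?_)
    simp; omega

lemma loopA_inv : ∀ (rest : List Int) (fuel : Nat) (out run : List Int) (l : Int),
    rest.length ≤ fuel → run ≠ [] → run.getLast? = some l →
    loopA fuel (out ++ run ++ rest) ((out.length : Nat) : Int) ((out.length + run.length : Nat) : Int)
      = out ++ runF run l rest := by
  intro rest
  induction rest with
  | nil =>
    intro fuel out run l _ hr _
    have hguard : ¬ (((out.length + run.length : Nat) : Int) < ((out ++ run ++ []).length : Int)) := by
      simp
    have hA := addA_spec out run [] hr
    cases fuel with
    | zero => rw [loopA, hA]; simp [runF]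
    | succ f => rw [loopA, if_neg hguard, hA]; simp [runF]
  | cons x rest' ih =>
    intro fuel out run l hf hr hlast
    obtain ⟨run₀, hrun⟩ : ∃ run₀, run = run₀ ++ [l] := by
      rcases List.eq_nil_or_concat run with h | ⟨r₀, a, h⟩
      · exact absurd h hr
      · exact ⟨r₀, by rw [h]; have := hlast; rw [h] at this; simpa using this⟩
    cases fuel with
    | zero => exact absurd hf (by simp)
    | succ f =>
      rw [loopA]
      have hguard : (((out.length + run.length : Nat) : Int) < ((out ++ run ++ x :: rest').length : Int)) := by
        simp
      rw [if_pos hguard]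
      have hg1 : PySem.List.pyGetD (out ++ run ++ x :: rest') (((out.length + run.length : Nat) : Int) - 1) 0 = l := by
        have : (((out.length + run.length : Nat) : Int) - 1) = (((out ++ run₀).length : Nat) : Int) := by
          simp [hrun]; omega
        rw [this, PySem.List.pyGetD_natCast]
        have : out ++ run ++ x :: rest' = (out ++ run₀) ++ l :: (x :: rest') := by simp [hrun]
        rw [this, getD_app]
      have hg2 : PySem.List.pyGetD (out ++ run ++ x :: rest') ((out.length + run.length : Nat) : Int) 0 = x := by
        rw [PySem.List.pyGetD_natCast]
        have : out ++ run ++ x :: rest' = (out ++ run) ++ x :: rest' := by simp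
        rw [this, show out.length + run.length = (out ++ run).length by simp, getD_app]
      rw [hg1, hg2]
      by_cases hlt : l < x
      · rw [if_neg (by omega)]
        have hre : out ++ run ++ x :: rest' = out ++ (run ++ [x]) ++ rest' := by simp
        have hlen : ((out.length + run.length : Nat) : Int) + 1 = ((out.length + (run ++ [x]).length : Nat) : Int) := by
          push_cast; simp; ring
        rw [hre, hlen, ih f out (run ++ [x]) x (by simpa using hf) (by simp) (by simp)]
        rw [show runF run l (x :: rest') = runF (run ++ [x]) x rest' by rw [runF, if_pos hlt]]
      · rw [if_pos (by omega)]
        rw [addA_spec out run (x :: rest') hr]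
        show loopA f (out ++ dupR run ++ x :: rest') ((out.length + (dupR run).length : Nat) : Int)
            (((out.length + (dupR run).length : Nat) : Int) + 1) = out ++ runF run l (x :: rest')
        have hre : out ++ dupR run ++ x :: rest' = (out ++ dupR run) ++ [x] ++ rest' := by simp
        have hlen : ((out.length + (dupR run).length : Nat) : Int) + 1
            = (((out ++ dupR run).length + ([x] : List Int).length : Nat) : Int) := by
          simp
        have hlen2 : ((out.length + (dupR run).length : Nat) : Int) = (((out ++ dupR run).length : Nat) : Int) := by
          simp
        rw [hre, hlen, hlen2, ih f (out ++ dupR run) [x] x (by simpa using hf) (by simp) (by simp)]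
        rw [show runF run l (x :: rest') = dupR run ++ runF [x] x rest' by rw [runF, if_neg (by omega)]]
        simp

lemma foldB : ∀ (xs : List Int) (out run : List Int) (l : Int), run ≠ [] →
    PySem.List.pyGetD run (-1) 0 = l →
    (xs.foldl dupStepB (out, run)).1
      ++ (if 1 < (xs.foldl dupStepB (out, run)).2.length
          then (xs.foldl dupStepB (out, run)).2 ++ (xs.foldl dupStepB (out, run)).2
          else (xs.foldl dupStepB (out, run)).2)
      = out ++ runF run l xs := by
  intro xs
  induction xs with
  | nil => intro out run l _ _; simp [runF, dupR]
  | cons x xs ih =>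
    intro out run l hr hl
    rw [List.foldl_cons]
    by_cases hlt : l < x
    · have hs : dupStepB (out, run) x = (out, run ++ [x]) := by
        unfold dupStepB
        rw [if_pos ⟨hr, by rw [hl]; exact hlt⟩]
      rw [hs, ih out (run ++ [x]) x (by simp)
        (PySem.List.pyGetD_neg_one_append_singleton (xs := run) (x := x) (d := 0))]
      rw [runF, if_pos hlt]
    · have hs' : dupStepB (out, run) x
          = (out ++ (if 1 < run.length then run ++ run else run), [x]) := by
        unfold dupStepB
        rw [if_neg (by rw [hl]; tauto)]
      rw [hs', ih (out ++ (if 1 < run.length then run ++ run else run)) [x] x (by simp) (by simpa using PySem.List.pyGetD_neg_one_append_singleton (xs := ([] : List Int)) (x := x) (d := 0))]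
      rw [runF, if_neg hlt]
      simp [dupR]


-- ===== VERDICT (by name: the statement is the Claim_ definition above) =====
theorem f_ins_spec : Claim_equal_f_ins := by
  intro arr _
  unfold Spec_f_ins
  cases arr with
  | nil => rfl
  | cons a as =>
    have hA : f_ins (a :: as) = [] ++ runF [a] a as := by
      have := loopA_inv as (as.length + 1) [] [a] a (by omega) (by simp) (by simp)
      simpa [f_ins] using this
    have hB : f_ins_alt (a :: as) = [] ++ runF [a] a as := by
      have hstep : dupStepB (([] : List Int), ([] : List Int)) a = ([], [a]) := by
        unfold dupStepB; simp
      have := foldB as [] [a] a (by simp)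
        (by simpa using PySem.List.pyGetD_neg_one_append_singleton (xs := ([] : List Int)) (x := a) (d := 0))
      simp only [f_ins_alt, List.foldl_cons, hstep]
      exact this
    rw [hA, hB]
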